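-- pv_equiv track=rewrite | github.com/Minna-Cross/HALSyntax | Knucklebones_v2.py | calculate_column_score
-- ===== SOURCE A (Python) =====
-- def calculate_column_score(col_values):
--     """Score a column by multiplying matching dice together."""
--     score = 0
--     dice_counts = {}
--
--     # Count the occurrences of each die value in the column
--     for value in col_values:
--         if value in dice_counts:
--             dice_counts[value] += 1
--         else:
--             dice_counts[value] = 1
--
--     # Multiply matching dice and sum the total score for the column
--     for value, count in dice_counts.items():
--         score += value * count ** 2  # Multiply value by how many dice of that value are in the column
--
--     return score
-- ===== SOURCE B (Python) =====
-- def calculate_column_score(col_values):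
--     """Score a column by multiplying matching dice together."""
--     return sum(v * col_values.count(v) for v in col_values)
-- ===== Notes on version B (the rewrite author's own statement) =====
-- stated objective: simpler
-- what changed: Replaces the two-phase dict-counting-then-aggregation with a single comprehension summing v * count(v) over every occurrence (each value v with k occurrences contributes k terms of v*k, i.e. v*k^2), so no dictionary or distinct-values pass exists.
import Mathlib
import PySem

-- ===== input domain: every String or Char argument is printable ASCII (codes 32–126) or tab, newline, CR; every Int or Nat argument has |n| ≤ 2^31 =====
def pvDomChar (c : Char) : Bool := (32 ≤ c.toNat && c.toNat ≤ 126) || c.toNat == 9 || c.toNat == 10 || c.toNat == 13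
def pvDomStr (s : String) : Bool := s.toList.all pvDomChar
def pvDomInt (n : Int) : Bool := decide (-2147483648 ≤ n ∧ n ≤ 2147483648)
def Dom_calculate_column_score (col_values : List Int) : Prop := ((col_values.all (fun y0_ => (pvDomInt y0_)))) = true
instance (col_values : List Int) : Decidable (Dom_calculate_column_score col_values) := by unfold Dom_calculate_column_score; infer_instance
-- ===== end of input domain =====

-- B replaces A's dict-counting-then-aggregation with a single comprehension summing
-- v * count(v) over every occurrence (simpler; not faster).

-- ===== PORT A =====
def calculate_column_score (col_values : List Int) : Int :=
  let dice_counts : PySem.Dict Int Int :=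
    col_values.foldl (fun d value =>
      if d.contains value then d.insert value (d.getD value 0 + 1)   -- dice_counts[value] += 1
      else d.insert value 1) PySem.Dict.empty
  dice_counts.items.foldl (fun score vc => score + vc.1 * vc.2 ^ (2 : Nat)) 0

-- ===== PORT B =====
def calculate_column_score_alt (col_values : List Int) : Int :=
  (col_values.map (fun v => v * (PySem.List.count col_values v : Int))).sum

-- ===== PRECONDITION & SPEC =====
def Spec_calculate_column_score (col_values : List Int) (out : Int) : Prop := out = calculate_column_score_alt col_values
instance (col_values : List Int) (out : Int) : Decidable (Spec_calculate_column_score col_values out) := by unfold Spec_calculate_column_score; infer_instance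

-- ===== CLAIM (what is proved, stated in full; the proofs are below) =====
def Claim_equal_calculate_column_score : Prop := ∀ (col_values : List Int), Dom_calculate_column_score col_values → Spec_calculate_column_score col_values (calculate_column_score col_values)

-- ===== LEMMAS AND PROOFS =====

-- A key absent from the dict reads as the default 0, so A's two branches coincide.
theorem pv_getD_zero_of_not_contains (d : PySem.Dict Int Int) (v : Int)
    (h : d.contains v = false) : d.getD v 0 = 0 := by
  obtain ⟨l⟩ := d
  induction l with
  | nil => rfl
  | cons p rest ih =>
    obtain ⟨k0, v0⟩ := p
    simp only [PySem.Dict.contains_mk, List.any_cons, Bool.or_eq_false_iff] at h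
    have h2 := ih (by simp [PySem.Dict.contains_mk, h.2])
    simp only [PySem.Dict.getD, PySem.Dict.get?_mk_cons, h.1] at h2 ⊢
    exact h2

-- Both sets of distinct elements give the same Finset.
theorem pv_toFinset_ofList (l : List Int) :
    (PySem.Set.ofList l).toFinset = l.toFinset := by
  ext x
  simp [PySem.Set.mem_ofList]

theorem calculate_column_score_eq_alt (l : List Int) :
    calculate_column_score l = calculate_column_score_alt l := by
  unfold calculate_column_score calculate_column_score_alt
  have hfun : (fun (d : PySem.Dict Int Int) (value : Int) =>
      if d.contains value then d.insert value (d.getD value 0 + 1)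
      else d.insert value 1) = fun d x => d.insert x (d.getD x 0 + 1) := by
    funext d v
    by_cases h : d.contains v
    · simp [h]
    · simp [h, pv_getD_zero_of_not_contains d v (by simpa using h)]
  rw [hfun, PySem.Dict.foldl_insert_getD_add_one_eq_counter]
  simp only [PySem.Dict.items_counter, PySem.List.foldl_add, List.map_map]
  simp only [PySem.List.count_eq, Function.comp_def, zero_add]
  rw [← List.sum_toFinset (fun k => k * (List.count k l : Int) ^ (2 : Nat))
      (PySem.Set.nodup_ofList l), pv_toFinset_ofList,
    Finset.sum_list_map_count l (fun v => v * (List.count v l : Int))]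
  refine Finset.sum_congr rfl fun m _ => ?_
  push_cast [nsmul_eq_mul]
  ring

-- ===== VERDICT (by name: the statement is the Claim_ definition above) =====
theorem calculate_column_score_spec : Claim_equal_calculate_column_score := by
  intro l _
  unfold Spec_calculate_column_score
  exact calculate_column_score_eq_alt l
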